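-- pv_equiv track=rewrite | github.com/Bwenz68/supply-signals | data_ingest/pr_feeds_cli.py | _split_list
-- ===== SOURCE A (Python) =====
-- from typing import Any, Dict, List, Optional, Tuple
--
-- def _split_list(s: Optional[str]) -> List[str]:
--     if not s:
--         return []
--     # allow comma/semicolon separated
--     parts = []
--     for chunk in s.split(";"):
--         for sub in chunk.split(","):
--             t = sub.strip()
--             if t:
--                 parts.append(t)
--     return parts
-- ===== SOURCE B (Python) =====
-- def _split_list(s):
--     # single character-level scan: build each token in an accumulator and
--     # flush it (stripped, if non-empty) at every delimiter; a trailing ';'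
--     # sentinel flushes the last token
--     parts = []
--     cur = []
--     for ch in (s or "") + ";":
--         if ch == ";" or ch == ",":
--             t = "".join(cur).strip()
--             if t:
--                 parts.append(t)
--             cur = []
--         else:
--             cur.append(ch)
--     return parts
-- ===== Notes on version B (the rewrite author's own statement) =====
-- stated objective: alternative
-- what changed: Replaces the nested split-then-strip loops by a single character-level scan that builds each token in an accumulator and flushes it at every delimiter (with a trailing sentinel delimiter).
import Mathlib
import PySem

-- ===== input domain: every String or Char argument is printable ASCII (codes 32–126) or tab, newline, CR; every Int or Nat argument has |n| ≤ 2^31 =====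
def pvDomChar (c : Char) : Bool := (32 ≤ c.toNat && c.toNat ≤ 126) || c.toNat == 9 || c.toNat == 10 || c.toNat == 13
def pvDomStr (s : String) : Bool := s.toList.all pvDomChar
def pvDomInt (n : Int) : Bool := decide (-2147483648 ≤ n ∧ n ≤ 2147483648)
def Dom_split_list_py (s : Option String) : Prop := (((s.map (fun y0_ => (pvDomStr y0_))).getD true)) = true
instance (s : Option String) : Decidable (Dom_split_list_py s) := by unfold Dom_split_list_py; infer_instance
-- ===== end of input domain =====

-- B replaces A's nested split-then-strip loops by a single character-level scan that builds each token in an accumulator and flushes it at every delimiter; same values (alternative decomposition, same cost).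

-- ===== PORT A =====
-- literal port: nested loops over the two-level split; t = sub.strip(); append t if non-empty
def split_list_py (s : Option String) : List String :=
  match s with
  | none => []
  | some str =>
    if str = "" then []
    else
      ((PySem.Str.split? str ";").getD []).foldl (fun parts chunk =>
        ((PySem.Str.split? chunk ",").getD []).foldl (fun parts sub =>
          let t := PySem.Str.strip sub
          if t = "" then parts else parts ++ [t]) parts) []

-- ===== PORT B =====
-- the loop body of Source B: flush the stripped accumulator at a delimiter, else extend it
def altStep (st : List String × List Char) (ch : Char) : List String × List Char :=
  if ch = ';' ∨ ch = ',' then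
    let t := PySem.Str.strip (String.ofList st.2)
    (if t = "" then st.1 else st.1 ++ [t], [])
  else (st.1, st.2 ++ [ch])

-- literal port of Source B: fold altStep over the characters of (s or "") + ";" with (parts, cur)
-- ('s or ""' is none → "" and some str → str; the falsy some "" also yields "", so getD is exact)
def split_list_py_alt (s : Option String) : List String :=
  (((s.getD "") ++ ";").toList.foldl altStep ([], [])).1

-- ===== PRECONDITION & SPEC =====
def Spec_split_list_py (s : Option String) (out : List String) : Prop := out = split_list_py_alt s
instance (s : Option String) (out : List String) : Decidable (Spec_split_list_py s out) := by unfold Spec_split_list_py; infer_instance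

-- ===== CLAIM (what is proved, stated in full; the proofs are below) =====
def Claim_equal_split_list_py : Prop := ∀ (s : Option String), Dom_split_list_py s → Spec_split_list_py s (split_list_py s)

-- ===== LEMMAS AND PROOFS =====

-- structural single-character splitter (proof-side model of splitOn with a one-char separator)
def spC (d : Char) : List Char → List (List Char)
  | [] => [[]]
  | c :: t => if c = d then [] :: spC d t else (spC d t).modifyHead (c :: ·)

-- proof-side model of B's scan: split on either delimiter
def spC2 : List Char → List (List Char)
  | [] => [[]]
  | c :: t => if c = ';' ∨ c = ',' then [] :: spC2 t else (spC2 t).modifyHead (c :: ·)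

theorem spC_ne_nil (d : Char) (l : List Char) : spC d l ≠ [] := by
  induction l with
  | nil => simp [spC]
  | cons c t ih =>
    simp only [spC]
    split
    · simp
    · cases h : spC d t with
      | nil => exact absurd h ih
      | cons a b => simp [List.modifyHead]

theorem spC2_ne_nil (l : List Char) : spC2 l ≠ [] := by
  induction l with
  | nil => simp [spC2]
  | cons c t ih =>
    simp only [spC2]
    split
    · simp
    · cases h : spC2 t with
      | nil => exact absurd h ih
      | cons a b => simp [List.modifyHead]

theorem splitOn_go_single (d : Char) :
    ∀ (fuel : Nat) (l cur : List Char) (acc : List (List Char)), l.length ≤ fuel →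
      PySem.Chars.splitOn.go [d] fuel l cur acc =
        acc.reverse ++ (spC d l).modifyHead (cur.reverse ++ ·) := by
  intro fuel
  induction fuel with
  | zero =>
    intro l cur acc h
    cases l with
    | nil => simp [PySem.Chars.splitOn.go, spC, List.modifyHead]
    | cons c t => simp at h
  | succ n ih =>
    intro l cur acc h
    cases l with
    | nil => simp [PySem.Chars.splitOn.go, spC, List.modifyHead]
    | cons c t =>
      simp only [List.length_cons] at h
      by_cases hc : c = d
      · have hb : (d == c) = true := by simp [hc]
        simp only [PySem.Chars.splitOn.go, List.isPrefixOf, hb, Bool.true_and,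
          List.length_singleton, List.drop_one, List.tail_cons]
        rw [ih t [] _ (by omega)]
        cases hsp : spC d t with
        | nil => exact absurd hsp (spC_ne_nil d t)
        | cons hh r => simp [spC, hc, hsp, List.modifyHead]
      · have hb : (d == c) = false := by simp [Ne.symm hc]
        simp only [PySem.Chars.splitOn.go, List.isPrefixOf, hb, Bool.false_and,
          Bool.false_eq_true, if_false]
        rw [ih t (c :: cur) _ (by omega)]
        cases hsp : spC d t with
        | nil => exact absurd hsp (spC_ne_nil d t)
        | cons hh r => simp [spC, hc, hsp, List.modifyHead]

theorem splitOn_single (d : Char) (l : List Char) :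
    PySem.Chars.splitOn l [d] = spC d l := by
  unfold PySem.Chars.splitOn
  rw [splitOn_go_single d (l.length + 1) l [] [] (by omega)]
  cases hsp : spC d l with
  | nil => exact absurd hsp (spC_ne_nil d l)
  | cons h r => simp [List.modifyHead]

theorem split_semi (s : String) :
    (PySem.Str.split? s ";").getD [] = (spC ';' s.toList).map String.ofList := by
  have hsep : (";" : String).toList = [';'] := by decide
  simp [PySem.Str.split?, PySem.Chars.split?, hsep, splitOn_single]

theorem split_comma (s : String) :
    (PySem.Str.split? s ",").getD [] = (spC ',' s.toList).map String.ofList := by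
  have hsep : ("," : String).toList = [','] := by decide
  simp [PySem.Str.split?, PySem.Chars.split?, hsep, splitOn_single]

-- splitting on either delimiter at once equals the nested two-level split
theorem spC2_eq_flatMap (l : List Char) :
    spC2 l = (spC ';' l).flatMap (spC ',') := by
  induction l with
  | nil => simp [spC2, spC]
  | cons c t ih =>
    by_cases hsemi : c = ';'
    · simp [spC2, spC, hsemi, ih, List.flatMap_cons]
    · cases hsp : spC ';' t with
      | nil => exact absurd hsp (spC_ne_nil ';' t)
      | cons h r =>
        rw [hsp, List.flatMap_cons] at ih
        by_cases hcom : c = ','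
        · simp [spC2, spC, hcom, ih, hsp, List.modifyHead, List.flatMap_cons]
        · cases hsb : spC ',' h with
          | nil => exact absurd hsb (spC_ne_nil ',' h)
          | cons g q =>
            rw [hsb] at ih
            have hcd : ¬ (c = ';' ∨ c = ',') := by tauto
            simp [spC2, spC, hsemi, hcom, ih, hsp, List.modifyHead,
              List.flatMap_cons, hsb]

theorem inner_fold (l : List String) (parts : List String) :
    l.foldl (fun parts sub =>
        let t := PySem.Str.strip sub
        if t = "" then parts else parts ++ [t]) parts
      = parts ++ (l.map PySem.Str.strip).filter (fun t => t ≠ "") := by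
  have hfun : (fun (parts : List String) sub =>
        let t := PySem.Str.strip sub
        if t = "" then parts else parts ++ [t])
      = (fun parts sub =>
        if (PySem.Str.strip sub != "") = true then parts ++ [PySem.Str.strip sub] else parts) := by
    funext parts sub
    by_cases hs : PySem.Str.strip sub = "" <;> simp [hs]
  rw [hfun, PySem.List.foldl_append_if]
  simp only [List.filter_map, Function.comp_def, ne_eq]
  congr 1
  apply congrArg
  apply List.filter_congr
  intro x _
  by_cases hq : PySem.Str.strip x = "" <;> simp [hq]

-- B's scan computes: strip-and-filter the pieces of the either-delimiter split
theorem tok_fold (l : List Char) : ∀ (parts : List String) (cur : List Char),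
    ((l ++ [';']).foldl altStep (parts, cur)).1
      = parts ++ (((spC2 l).modifyHead (cur ++ ·)).map
          (fun cs => PySem.Str.strip (String.ofList cs))).filter (fun t => t ≠ "") := by
  induction l with
  | nil =>
    intro parts cur
    simp only [List.nil_append, List.foldl_cons, List.foldl_nil, altStep, spC2,
      List.modifyHead, List.map_cons, List.map_nil, List.append_nil]
    by_cases hs : PySem.Str.strip (String.ofList cur) = "" <;>
      simp [hs, List.filter]
  | cons c t ih =>
    intro parts cur
    by_cases hd : c = ';' ∨ c = ','
    · have hstep : altStep (parts, cur) c =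
          (if PySem.Str.strip (String.ofList cur) = ""
             then parts else parts ++ [PySem.Str.strip (String.ofList cur)], []) := by
        simp [altStep, hd]
      simp only [List.cons_append, List.foldl_cons, hstep, ih]
      cases hsp : spC2 t with
      | nil => exact absurd hsp (spC2_ne_nil t)
      | cons h r =>
        by_cases hs : PySem.Str.strip (String.ofList cur) = "" <;>
          simp [spC2, hd, hsp, List.modifyHead, List.filter, hs]
    · have hstep : altStep (parts, cur) c = (parts, cur ++ [c]) := by
        simp [altStep, hd]
      simp only [List.cons_append, List.foldl_cons, hstep, ih]
      cases hsp : spC2 t with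
      | nil => exact absurd hsp (spC2_ne_nil t)
      | cons h r => simp [spC2, hd, hsp, List.modifyHead]

theorem alt_closed (str : String) :
    split_list_py_alt (some str)
      = (((spC ';' str.toList).flatMap (spC ',')).map
          (fun cs => PySem.Str.strip (String.ofList cs))).filter (fun t => t ≠ "") := by
  unfold split_list_py_alt
  have hl : ((str ++ ";")).toList = str.toList ++ [';'] := by
    simp [String.toList_append]
  simp only [Option.getD_some, hl, tok_fold, List.nil_append, ← spC2_eq_flatMap]
  cases hsp : spC2 str.toList with
  | nil => exact absurd hsp (spC2_ne_nil _)
  | cons h r => simp [List.modifyHead]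

-- ===== VERDICT (by name: the statement is the Claim_ definition above) =====
theorem split_list_py_spec : Claim_equal_split_list_py := by
  intro s _
  unfold Spec_split_list_py
  cases s with
  | none =>
    simp only [split_list_py, split_list_py_alt]
    decide
  | some str =>
    rw [alt_closed]
    by_cases h : str = ""
    · subst h
      simp only [split_list_py]
      decide
    · simp only [split_list_py, if_neg h]
      rw [split_semi]
      simp only [inner_fold]
      rw [PySem.List.foldl_append_eq_flatMap]
      simp [List.flatMap_map, List.map_flatMap, List.filter_flatMap, split_comma,
        String.toList_ofList, Function.comp_def]
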